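-- pv_equiv track=rewrite | github.com/EdwardZehuaZhang/3d-printing-monorepo | OpenVCAD-Public/test/stanford_bunny/visualize_path.py | mst_to_path
-- ===== SOURCE A (Python) =====
-- def mst_to_path(mst_edges, n):
--     adj = [[] for _ in range(n)]
--     for a, b in mst_edges:
--         adj[a].append(b)
--         adj[b].append(a)
--     seen = [False] * n
--     path = []
--
--     def dfs(node):
--         seen[node] = True
--         path.append(node)
--         for nxt in adj[node]:
--             if not seen[nxt]:
--                 dfs(nxt)
--                 path.append(node)
--
--     dfs(0)
--     return path
-- ===== SOURCE B (Python) =====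
-- def mst_to_path(mst_edges, n):
--     adj = [[] for _ in range(n)]
--     for a, b in mst_edges:
--         adj[a].append(b)
--         adj[b].append(a)
--     seen = [False] * n
--     seen[0] = True
--     path = [0]
--     stack = [(0, iter(adj[0]))]
--     while stack:
--         node, it = stack[-1]
--         nxt = next(it, None)
--         if nxt is None:
--             stack.pop()
--             if stack:
--                 path.append(stack[-1][0])
--         elif not seen[nxt]:
--             seen[nxt] = True
--             path.append(nxt)
--             stack.append((nxt, iter(adj[nxt])))
--     return path
-- ===== Notes on version B (the rewrite author's own statement) =====
-- stated objective: alternative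
-- what changed: The recursive Euler-tour dfs (with its backtracking append after each child call) is replaced by an iterative explicit stack of (node, neighbor-iterator) frames that marks/appends on push and re-appends the parent on pop, eliminating recursion (and Python's recursion-depth limit) at the same O(n + m) cost.
import Mathlib
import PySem

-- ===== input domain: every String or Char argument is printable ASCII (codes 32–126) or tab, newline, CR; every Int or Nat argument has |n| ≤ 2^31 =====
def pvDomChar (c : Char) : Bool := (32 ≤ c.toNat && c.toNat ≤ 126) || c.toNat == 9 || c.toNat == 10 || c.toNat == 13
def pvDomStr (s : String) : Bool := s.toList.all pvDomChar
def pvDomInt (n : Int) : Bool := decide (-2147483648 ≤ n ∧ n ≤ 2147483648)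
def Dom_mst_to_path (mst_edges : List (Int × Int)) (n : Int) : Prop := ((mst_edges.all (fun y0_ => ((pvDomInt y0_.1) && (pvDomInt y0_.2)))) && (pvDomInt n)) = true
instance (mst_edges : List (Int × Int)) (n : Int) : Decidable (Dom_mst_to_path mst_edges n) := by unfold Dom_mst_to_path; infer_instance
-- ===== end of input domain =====

-- B replaces A's recursive Euler-tour DFS by an explicit stack of (node, remaining-neighbors)
-- frames (same output, no recursion); objective: alternative decomposition, same cost.

-- ===== PORT A =====
-- adjacency building shared verbatim by both Pythons: adj[a].append(b); adj[b].append(a)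
def pvBuildAdj (mst_edges : List (Int × Int)) (adj0 : List (List Int)) : List (List Int) :=
  mst_edges.foldl (fun adj e =>
    let adj1 := PySem.List.pySetD adj e.1 (PySem.List.pyGetD adj e.1 [] ++ [e.2])
    PySem.List.pySetD adj1 e.2 (PySem.List.pyGetD adj1 e.2 [] ++ [e.1])) adj0

-- A's recursive dfs, fueled for totality (fuel n+1 always suffices on Pre_; `none` is unreachable there).
-- pvDfs node = body of dfs(node); pvGo = its `for nxt in adj[node]` loop, threading (seen, path-segment).
mutual
def pvDfs (adj : List (List Int)) : Nat → List Bool → Int → Option (List Bool × List Int)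
  | 0, _, _ => none
  | f + 1, seen, node =>
    let seen1 := PySem.List.pySetD seen node true
    match pvGo adj f seen1 node (PySem.List.pyGetD adj node []) with
    | some (s, p) => some (s, node :: p)
    | none => none
  termination_by f _ _ => (f, 0)

def pvGo (adj : List (List Int)) : Nat → List Bool → Int → List Int → Option (List Bool × List Int)
  | _, seen, _, [] => some (seen, [])
  | f, seen, node, nxt :: rest =>
    if PySem.List.pyGetD seen nxt true then pvGo adj f seen node rest
    else
      match pvDfs adj f seen nxt with
      | none => none
      | some (s1, p1) =>
        match pvGo adj f s1 node rest with
        | none => none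
        | some (s2, p2) => some (s2, p1 ++ node :: p2)
  termination_by f _ _ l => (f, l.length + 1)
end

def mst_to_path (mst_edges : List (Int × Int)) (n : Int) : List Int :=
  let adj := pvBuildAdj mst_edges (List.replicate n.toNat [])
  let seen := List.replicate n.toNat false
  match pvDfs adj (n.toNat + 1) seen 0 with
  | some (_, p) => p
  | none => []

-- ===== PORT B =====
-- termination fact for pvLoop: marking a yet-unseen index strictly lowers the number of `false`s
lemma pvCountSetLt : ∀ (xs : List Bool) (k : Nat), xs[k]? = some false →
    (xs.set k true).count false < xs.count false := by
  intro xs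
  induction xs with
  | nil => intro k h; simp at h
  | cons x t ih =>
    intro k h
    cases k with
    | zero => simp_all
    | succ k =>
      simp only [List.getElem?_cons_succ] at h
      have := ih k h
      simp [List.count_cons]
      omega

lemma pvCountFalse_set (seen : List Bool) (i : Int)
    (h : PySem.List.pyGetD seen i true = false) :
    (PySem.List.pySetD seen i true).count false < seen.count false := by
  unfold PySem.List.pyGetD PySem.List.pyGet? PySem.List.pySetD PySem.List.pySet? at *
  cases hk : PySem.List.pyIdx? seen.length i with
  | none => simp [hk] at h
  | some k =>
    simp only [hk, Option.bind_some, Option.map_some, Option.getD_some] at h ⊢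
    cases hg : seen[k]? with
    | none => simp [hg] at h
    | some b =>
      simp [hg] at h
      subst h
      exact pvCountSetLt seen k hg

-- B's while-loop: stack of (node, remaining neighbors); exhausted frame pops and re-appends the parent.
def pvLoop (adj : List (List Int)) (seen : List Bool) (path : List Int)
    (stack : List (Int × List Int)) : List Int :=
  match stack with
  | [] => path.reverse
  | (_, []) :: stk =>
    match stk with
    | [] => path.reverse
    | (pn, pr) :: st => pvLoop adj seen (pn :: path) ((pn, pr) :: st)
  | (node, nxt :: rest) :: stk =>
    if PySem.List.pyGetD seen nxt true then pvLoop adj seen path ((node, rest) :: stk)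
    else pvLoop adj (PySem.List.pySetD seen nxt true) (nxt :: path)
           ((nxt, PySem.List.pyGetD adj nxt []) :: (node, rest) :: stk)
  termination_by (seen.count false, (stack.map (fun fr => fr.2.length)).sum + stack.length)
  decreasing_by
  · apply Prod.Lex.right; simp
  · apply Prod.Lex.right; simp
  · apply Prod.Lex.left; exact pvCountFalse_set seen nxt (by simp_all)

def mst_to_path_alt (mst_edges : List (Int × Int)) (n : Int) : List Int :=
  let adj := pvBuildAdj mst_edges (List.replicate n.toNat [])
  let seen := PySem.List.pySetD (List.replicate n.toNat false) 0 true
  pvLoop adj seen [0] [(0, PySem.List.pyGetD adj 0 [])]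

-- ===== PRECONDITION & SPEC =====
-- Pre_ excludes exactly where Python A raises IndexError: n < 1 (dfs(0) on an empty adj)
-- or an edge endpoint outside [-n, n) (negative endpoints wrap; both programs wrap identically).
def Pre_mst_to_path (mst_edges : List (Int × Int)) (n : Int) : Prop :=
  1 ≤ n ∧ ∀ e ∈ mst_edges, -n ≤ e.1 ∧ e.1 < n ∧ -n ≤ e.2 ∧ e.2 < n
instance (mst_edges : List (Int × Int)) (n : Int) : Decidable (Pre_mst_to_path mst_edges n) := by
  unfold Pre_mst_to_path; infer_instance

def pvWitness_mst_to_path : (List (Int × Int)) × Int := ([(0, 1), (1, 2)], 3)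

def Spec_mst_to_path (mst_edges : List (Int × Int)) (n : Int) (out : List Int) : Prop := out = mst_to_path_alt mst_edges n
instance (mst_edges : List (Int × Int)) (n : Int) (out : List Int) : Decidable (Spec_mst_to_path mst_edges n out) := by unfold Spec_mst_to_path; infer_instance

-- ===== CLAIM (what is proved, stated in full; the proofs are below) =====
def Claim_equal_mst_to_path : Prop := ∀ (mst_edges : List (Int × Int)) (n : Int), Dom_mst_to_path mst_edges n → Pre_mst_to_path mst_edges n → Spec_mst_to_path mst_edges n (mst_to_path mst_edges n)

-- ===== LEMMAS AND PROOFS =====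

lemma pvCountSetLe : ∀ (xs : List Bool) (k : Nat),
    (xs.set k true).count false ≤ xs.count false := by
  intro xs
  induction xs with
  | nil => intro k; simp
  | cons x t ih =>
    intro k
    cases k with
    | zero => cases x <;> simp
    | succ k => have := ih k; simp [List.count_cons]; omega

lemma pvSetD_count_le (xs : List Bool) (i : Int) :
    (PySem.List.pySetD xs i true).count false ≤ xs.count false := by
  unfold PySem.List.pySetD PySem.List.pySet?
  cases hk : PySem.List.pyIdx? xs.length i with
  | none => simp
  | some k => simpa using pvCountSetLe xs k

lemma pvUnseen_count_pos (seen : List Bool) (i : Int)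
    (h : PySem.List.pyGetD seen i true = false) : 0 < seen.count false := by
  unfold PySem.List.pyGetD PySem.List.pyGet? at h
  cases hk : PySem.List.pyIdx? seen.length i with
  | none => simp [hk] at h
  | some k =>
    simp only [hk, Option.bind_some] at h
    cases hg : seen[k]? with
    | none => simp [hg] at h
    | some b =>
      simp [hg] at h; subst h
      exact List.count_pos_iff.2 (List.mem_of_getElem? hg)

-- count of `false` never grows along the recursion (mutual, by fuel)
lemma pvGo_count (adj : List (List Int)) (f : Nat)
    (hdfs : ∀ seen node s p, pvDfs adj f seen node = some (s, p) → s.count false ≤ seen.count false) :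
    ∀ l seen node s p, pvGo adj f seen node l = some (s, p) → s.count false ≤ seen.count false := by
  intro l
  induction l with
  | nil => intro seen node s p h; simp [pvGo] at h; simp [h.1]
  | cons nxt rest ih =>
    intro seen node s p h
    rw [pvGo] at h
    by_cases hs : PySem.List.pyGetD seen nxt true
    · rw [if_pos hs] at h; exact ih seen node s p h
    · rw [if_neg hs] at h
      cases h1 : pvDfs adj f seen nxt with
      | none => simp only [h1] at h; simp at h
      | some r1 =>
        obtain ⟨s1, p1⟩ := r1
        simp only [h1] at h
        cases h2 : pvGo adj f s1 node rest with
        | none => simp only [h2] at h; simp at h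
        | some r2 =>
          obtain ⟨s2, p2⟩ := r2
          simp only [h2] at h
          simp at h
          obtain ⟨rfl, rfl⟩ := h
          have ha := hdfs seen nxt s1 p1 h1
          have hb := ih s1 node s2 p2 h2
          omega

lemma pvDfs_count (adj : List (List Int)) :
    ∀ f seen node s p, pvDfs adj f seen node = some (s, p) → s.count false ≤ seen.count false := by
  intro f
  induction f with
  | zero => intro seen node s p h; simp [pvDfs] at h
  | succ f ih =>
    intro seen node s p h
    rw [pvDfs] at h
    cases hg : pvGo adj f (PySem.List.pySetD seen node true) node (PySem.List.pyGetD adj node []) with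
    | none => simp only [hg] at h; simp at h
    | some r =>
      obtain ⟨s', p'⟩ := r
      simp only [hg] at h
      simp at h
      obtain ⟨rfl, -⟩ := h
      have h1 := pvGo_count adj f ih _ _ _ _ _ hg
      have h2 := pvSetD_count_le seen node
      omega

-- sufficiency: fuel ≥ count of unseen nodes makes pvDfs/pvGo return `some`
lemma pvGo_some (adj : List (List Int)) (f : Nat)
    (hdfs : ∀ seen node, PySem.List.pyGetD seen node true = false → seen.count false ≤ f →
      ∃ r, pvDfs adj f seen node = some r) :
    ∀ l seen node, seen.count false ≤ f → ∃ r, pvGo adj f seen node l = some r := by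
  intro l
  induction l with
  | nil => intro seen node _; exact ⟨(seen, []), by simp [pvGo]⟩
  | cons nxt rest ih =>
    intro seen node hle
    by_cases hs : PySem.List.pyGetD seen nxt true
    · obtain ⟨r, hr⟩ := ih seen node hle
      exact ⟨r, by rw [pvGo, if_pos hs, hr]⟩
    · have hfalse : PySem.List.pyGetD seen nxt true = false := by simp_all
      obtain ⟨⟨s1, p1⟩, h1⟩ := hdfs seen nxt hfalse hle
      have hs1 : s1.count false ≤ f :=
        le_trans (pvDfs_count adj f seen nxt s1 p1 h1) hle
      obtain ⟨⟨s2, p2⟩, h2⟩ := ih s1 node hs1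
      exact ⟨(s2, p1 ++ node :: p2), by simp only [pvGo, if_neg hs, h1, h2]⟩

lemma pvDfs_some (adj : List (List Int)) :
    ∀ f seen node, PySem.List.pyGetD seen node true = false → seen.count false ≤ f →
      ∃ r, pvDfs adj f seen node = some r := by
  intro f
  induction f with
  | zero =>
    intro seen node hfalse hle
    exact absurd (pvUnseen_count_pos seen node hfalse) (by omega)
  | succ f ih =>
    intro seen node hfalse hle
    have hlt := pvCountFalse_set seen node hfalse
    obtain ⟨⟨s, p⟩, hg⟩ := pvGo_some adj f ih (PySem.List.pyGetD adj node [])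
      (PySem.List.pySetD seen node true) node (by omega)
    exact ⟨(s, node :: p), by simp only [pvDfs, hg]⟩

-- simulation: B's stack loop replays A's recursion exactly
def pvAfter (adj : List (List Int)) (seen : List Bool) (path : List Int) :
    List (Int × List Int) → List Int
  | [] => path.reverse
  | (pn, pr) :: st => pvLoop adj seen (pn :: path) ((pn, pr) :: st)

lemma pvSim_go (adj : List (List Int)) (f : Nat)
    (hdfs : ∀ seen node s p, pvDfs adj f seen node = some (s, p) → ∀ stack path,
      pvLoop adj (PySem.List.pySetD seen node true) (node :: path)
        ((node, PySem.List.pyGetD adj node []) :: stack) = pvAfter adj s (p.reverse ++ path) stack) :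
    ∀ l seen node s1 p1, pvGo adj f seen node l = some (s1, p1) → ∀ stack path,
      pvLoop adj seen path ((node, l) :: stack) = pvAfter adj s1 (p1.reverse ++ path) stack := by
  intro l
  induction l with
  | nil =>
    intro seen node s1 p1 h stack path
    simp [pvGo] at h
    obtain ⟨rfl, rfl⟩ := h
    cases stack with
    | nil => simp [pvLoop, pvAfter]
    | cons fr st => obtain ⟨pn, pr⟩ := fr; simp [pvLoop, pvAfter]
  | cons nxt rest ih =>
    intro seen node s1 p1 h stack path
    rw [pvGo] at h
    by_cases hs : PySem.List.pyGetD seen nxt true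
    · rw [if_pos hs] at h
      rw [pvLoop, if_pos hs]
      exact ih seen node s1 p1 h stack path
    · rw [if_neg hs] at h
      cases h1 : pvDfs adj f seen nxt with
      | none => simp only [h1] at h; simp at h
      | some r1 =>
        obtain ⟨sc, pc⟩ := r1
        simp only [h1] at h
        cases h2 : pvGo adj f sc node rest with
        | none => simp only [h2] at h; simp at h
        | some r2 =>
          obtain ⟨s2, p2⟩ := r2
          simp only [h2] at h
          simp at h
          obtain ⟨rfl, rfl⟩ := h
          rw [pvLoop, if_neg hs]
          rw [hdfs seen nxt sc pc h1 ((node, rest) :: stack) path]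
          rw [pvAfter]
          rw [ih sc node s2 p2 h2 stack (node :: (pc.reverse ++ path))]
          simp

lemma pvSim_dfs (adj : List (List Int)) :
    ∀ f seen node s p, pvDfs adj f seen node = some (s, p) → ∀ stack path,
      pvLoop adj (PySem.List.pySetD seen node true) (node :: path)
        ((node, PySem.List.pyGetD adj node []) :: stack) = pvAfter adj s (p.reverse ++ path) stack := by
  intro f
  induction f with
  | zero => intro seen node s p h; simp [pvDfs] at h
  | succ f ih =>
    intro seen node s p h stack path
    rw [pvDfs] at h
    cases hg : pvGo adj f (PySem.List.pySetD seen node true) node (PySem.List.pyGetD adj node []) with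
    | none => simp only [hg] at h; simp at h
    | some r =>
      obtain ⟨s', p'⟩ := r
      simp only [hg] at h
      simp at h
      obtain ⟨rfl, rfl⟩ := h
      rw [pvSim_go adj f ih _ _ _ _ _ hg stack (node :: path)]
      simp

-- ===== VERDICT (by name: the statement is the Claim_ definition above) =====
theorem mst_to_path_spec : Claim_equal_mst_to_path := by
  intro mst_edges n _ hpre
  unfold Spec_mst_to_path
  have hn : 1 ≤ n := hpre.1
  have hn' : 1 ≤ n.toNat := by omega
  have h0 : PySem.List.pyGetD (List.replicate n.toNat false) 0 true = false := by
    rw [PySem.List.pyGetD_zero]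
    obtain ⟨k, hk⟩ : ∃ k, n.toNat = k + 1 := ⟨n.toNat - 1, by omega⟩
    rw [hk, List.replicate_succ]
    rfl
  have hcount : (List.replicate n.toNat false).count false ≤ n.toNat + 1 := by
    simp
  obtain ⟨⟨s, p⟩, hds⟩ := pvDfs_some (pvBuildAdj mst_edges (List.replicate n.toNat []))
    (n.toNat + 1) (List.replicate n.toNat false) 0 h0 hcount
  have hB := pvSim_dfs (pvBuildAdj mst_edges (List.replicate n.toNat []))
    (n.toNat + 1) (List.replicate n.toNat false) 0 s p hds [] []
  simp only [pvAfter, List.append_nil, List.reverse_reverse] at hB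
  simp only [mst_to_path, mst_to_path_alt, hds, hB]
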